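-- pv_equiv track=rewrite | github.com/thclough/i-spy-tickers | archive/clean_v2.py | maintain_longest_sequences
-- ===== SOURCE A (Python) =====
-- def maintain_longest_sequences(power_sequences):
--     """Maintain longest encompassing sequences
--     ex. if have [['AGNC', 'Investment'], ['AGNC', 'Investment', 'Corp']]
--         should just leave [['AGNC', 'Investment', 'Corp']]
--
--     Args:
--         power_sequences (list) : list of the power sequences
--
--     """
--
--     # get rid of apostrophes
--     candidate_sequences = []
--     for sequence in power_sequences:
--         if sequence[-1][-2:] == "'s":
--             sequence1 = sequence[:]
--             sequence1[-1] = sequence[-1][:-2]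
--             if sequence1 not in candidate_sequences:
--                 candidate_sequences.append(sequence1)
--         else:
--             candidate_sequences.append(sequence)
--
--     # new power sequences
--     new_power_sequences = []
--
--     # subsequences will be listed before sequences
--     sorted_sequences = sorted(candidate_sequences, key=lambda x: len(x))
--
--     # subsequences have to be shorter than the longest sequence
--     sorted_candidate_subsequences = []
--     for sequence in sorted_sequences:
--         if len(sequence) < len(sorted_sequences[-1]):
--             sorted_candidate_subsequences.append(sequence)
--         else:
--             new_power_sequences.append(sequence)
--
--     for idx, sequence1 in enumerate(sorted_candidate_subsequences):
--         sequence_length = len(sequence1)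
--         add_flag = True
--         for sequence2 in sorted_sequences[idx+1:]:
--             if len(sequence2) >= len(sequence1) + 1:
--                 if sequence1 == sequence2[:sequence_length]:
--                     add_flag = False
--                     break
--         if add_flag:
--             new_power_sequences.append(sequence1)
--
--     return new_power_sequences
-- ===== SOURCE B (Python) =====
-- def maintain_longest_sequences(power_sequences):
--     """Drop sequences that are strict prefixes of longer ones, via a set of
--     candidate prefixes (a hash lookup per sequence instead of a rescan of all
--     later sorted sequences)."""
--     candidates = []
--     for seq in power_sequences:
--         last = seq[-1]
--         if last.endswith("'s"):
--             stripped = seq[:-1] + [last[:-2]]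
--             if stripped not in candidates:
--                 candidates.append(stripped)
--         else:
--             candidates.append(seq)
--
--     max_len = max(map(len, candidates), default=0)
--     # only prefixes whose length some shorter candidate has can ever be looked up
--     short_lengths = {len(c) for c in candidates if len(c) < max_len}
--     proper_prefixes = {tuple(c[:l]) for c in candidates for l in short_lengths if l < len(c)}
--
--     ordered = sorted(candidates, key=len)
--     longest = [c for c in ordered if len(c) == max_len]
--     kept = [c for c in ordered if len(c) < max_len and tuple(c) not in proper_prefixes]
--     return longest + kept
-- ===== Notes on version B (the rewrite author's own statement) =====
-- stated objective: alternative
-- what changed: Replaces A's rescan of all later sorted sequences for each short sequence by one hash set of candidate prefixes (restricted to lengths some shorter candidate has), so each sequence is kept or dropped by a single set lookup.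
import Mathlib
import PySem

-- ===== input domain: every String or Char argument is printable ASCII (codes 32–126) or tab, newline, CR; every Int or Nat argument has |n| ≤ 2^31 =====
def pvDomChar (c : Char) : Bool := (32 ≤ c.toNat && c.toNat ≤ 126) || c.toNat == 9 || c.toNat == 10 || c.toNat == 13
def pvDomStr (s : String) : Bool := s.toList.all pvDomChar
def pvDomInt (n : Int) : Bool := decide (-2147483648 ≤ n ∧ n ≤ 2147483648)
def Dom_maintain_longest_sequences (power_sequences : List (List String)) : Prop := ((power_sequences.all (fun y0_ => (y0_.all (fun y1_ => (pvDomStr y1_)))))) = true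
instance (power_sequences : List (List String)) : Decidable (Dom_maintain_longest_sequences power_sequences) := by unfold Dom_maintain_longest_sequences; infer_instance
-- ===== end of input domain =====

-- B replaces A's per-sequence rescan of the later sorted sequences by one set of candidate prefixes (a single set lookup per sequence); equivalence is on the return value (neither mutates its argument).

-- ===== PORT A =====
def maintain_longest_sequences (power_sequences : List (List String)) : List (List String) :=
  -- get rid of apostrophes
  let candidate_sequences := power_sequences.foldl (fun cand sequence =>
    let lastTok := (PySem.List.pyGet? sequence (-1)).getD ""   -- sequence[-1]; IndexError (empty inner list) excluded by Pre_
    if PySem.Str.slice lastTok (some (-2)) none == "'s" then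
      -- sequence1 = sequence[:]; sequence1[-1] = sequence[-1][:-2]
      let sequence1 := PySem.List.pySetD sequence (-1) (PySem.Str.slice lastTok none (some (-2)))
      if cand.contains sequence1 then cand else cand ++ [sequence1]
    else cand ++ [sequence]) []
  let sorted_sequences := PySem.List.sorted candidate_sequences (fun x => x.length) false
  -- sorted_sequences[-1] (only read inside loops that run when the list is nonempty)
  let lastSeq := (PySem.List.pyGet? sorted_sequences (-1)).getD []
  let pair := sorted_sequences.foldl
      (fun (acc : List (List String) × List (List String)) sequence =>
        if sequence.length < lastSeq.length then (acc.1, acc.2 ++ [sequence])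
        else (acc.1 ++ [sequence], acc.2)) ([], [])
  let new_power_sequences := pair.1
  let sorted_candidate_subsequences := pair.2
  (PySem.List.enumerate sorted_candidate_subsequences 0).foldl (fun acc q =>
      let sequence1 := q.2
      let sequence_length := sequence1.length
      let add_flag := !((PySem.List.slice sorted_sequences (some (q.1 + 1)) none).any
          (fun sequence2 => decide (sequence_length + 1 ≤ sequence2.length) &&
            (sequence1 == PySem.List.slice sequence2 none (some (sequence_length : Int)))))
      if add_flag then acc ++ [sequence1] else acc) new_power_sequences

-- ===== PORT B =====
def maintain_longest_sequences_alt (power_sequences : List (List String)) : List (List String) :=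
  let candidates := power_sequences.foldl (fun cand seq =>
    let last := (PySem.List.pyGet? seq (-1)).getD ""   -- seq[-1]; IndexError (empty inner list) excluded by Pre_
    if PySem.Str.endswith last "'s" then
      let stripped := PySem.List.slice seq none (some (-1)) ++ [PySem.Str.slice last none (some (-2))]
      if cand.contains stripped then cand else cand ++ [stripped]
    else cand ++ [seq]) []
  let maxLen := (PySem.List.max? (candidates.map (fun c => c.length)) (fun x => x)).getD 0
  -- only prefixes whose length some shorter candidate has can ever be looked up
  let shortLengths : PySem.Set Nat :=
    PySem.Set.ofList ((candidates.filter (fun c => decide (c.length < maxLen))).map (fun c => c.length))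
  let properPrefixes : PySem.Set (List String) :=
    PySem.Set.ofList (candidates.flatMap (fun c =>
      (shortLengths.filter (fun l => decide (l < c.length))).map (fun l => c.take l)))
  let ordered := PySem.List.sorted candidates (fun x => x.length) false
  let longest := ordered.filter (fun c => c.length == maxLen)
  let kept := ordered.filter (fun c => decide (c.length < maxLen) && !(PySem.Set.contains properPrefixes c))
  longest ++ kept

-- ===== PRECONDITION & SPEC =====
-- A raises IndexError on sequence[-1] when some inner list is empty; nothing else raises.
def Pre_maintain_longest_sequences (power_sequences : List (List String)) : Prop :=
  ∀ s ∈ power_sequences, s ≠ []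
instance (power_sequences : List (List String)) : Decidable (Pre_maintain_longest_sequences power_sequences) := by unfold Pre_maintain_longest_sequences; infer_instance
def pvWitness_maintain_longest_sequences : List (List String) := [["AGNC", "Investment"], ["AGNC", "Investment", "Corp"]]
def Spec_maintain_longest_sequences (power_sequences : List (List String)) (out : List (List String)) : Prop := out = maintain_longest_sequences_alt power_sequences
instance (power_sequences : List (List String)) (out : List (List String)) : Decidable (Spec_maintain_longest_sequences power_sequences out) := by unfold Spec_maintain_longest_sequences; infer_instance

-- ===== CLAIM (what is proved, stated in full; the proofs are below) =====
def Claim_equal_maintain_longest_sequences : Prop := ∀ (power_sequences : List (List String)), Dom_maintain_longest_sequences power_sequences → Pre_maintain_longest_sequences power_sequences → Spec_maintain_longest_sequences power_sequences (maintain_longest_sequences power_sequences)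

-- ===== LEMMAS AND PROOFS =====

-- A's "sequence[-1][-2:] == \"'s\"" test is B's str.endswith
theorem slice_neg_two_eq_endswith (s : String) :
    (PySem.Str.slice s (some (-2)) none == "'s") = PySem.Str.endswith s "'s" := by
  have h1 : PySem.Str.slice s (some (-2)) none = String.ofList (s.toList.drop (s.toList.length - 2)) := by
    have := PySem.List.slice_from_neg_ofNat s.toList 2 (by norm_num)
    simp [PySem.Str.slice, PySem.Chars.slice_eq_listSlice, this]
  rw [h1, Bool.eq_iff_iff]
  simp only [beq_iff_eq, PySem.Str.endswith_eq]
  rw [PySem.Chars.endswith_iff, List.suffix_iff_eq_drop]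
  have h2 : "'s".toList = ['\'', 's'] := by decide
  rw [h2]
  simp only [List.length_cons, List.length_nil, String.length_toList]
  rw [show s.length - (0 + 1 + 1) = s.length - 2 by omega]
  constructor
  · intro h
    have h3 := congrArg String.toList h
    simp [h2] at h3
    exact h3.symm
  · intro h
    rw [← h]

theorem pySetD_neg_one_eq (seq : List String) (h : seq ≠ []) (v : String) :
    PySem.List.pySetD seq (-1) v = PySem.List.slice seq none (some (-1)) ++ [v] := by
  rw [PySem.List.slice_to_neg_one]
  simp only [PySem.List.pySetD, PySem.List.pySet?]
  have hl : 0 < seq.length := List.length_pos_iff.mpr h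
  have hidx : PySem.List.pyIdx? seq.length (-1) = some (seq.length - 1) := by
    simp [PySem.List.pyIdx?]
    omega
  rw [hidx]
  simp only [Option.map_some, Option.getD_some]
  rw [List.set_eq_take_append_cons_drop, if_pos (by omega), List.dropLast_eq_take]
  have h2 : seq.length - 1 + 1 = seq.length := by omega
  rw [h2, List.drop_length]

theorem candidates_eq (ps : List (List String)) (h : ∀ s ∈ ps, s ≠ []) :
    ps.foldl (fun cand sequence =>
      let lastTok := (PySem.List.pyGet? sequence (-1)).getD ""
      if PySem.Str.slice lastTok (some (-2)) none == "'s" then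
        let sequence1 := PySem.List.pySetD sequence (-1) (PySem.Str.slice lastTok none (some (-2)))
        if cand.contains sequence1 then cand else cand ++ [sequence1]
      else cand ++ [sequence]) []
    = ps.foldl (fun cand seq =>
      let last := (PySem.List.pyGet? seq (-1)).getD ""
      if PySem.Str.endswith last "'s" then
        let stripped := PySem.List.slice seq none (some (-1)) ++ [PySem.Str.slice last none (some (-2))]
        if cand.contains stripped then cand else cand ++ [stripped]
      else cand ++ [seq]) [] := by
  apply PySem.List.foldl_congr_mem
  intro acc x hx
  have hne := h x hx
  dsimp only
  rw [slice_neg_two_eq_endswith, pySetD_neg_one_eq x hne]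

theorem foldl_split {α : Type} (P : α → Prop) [DecidablePred P] (l : List α) (a b : List α) :
    l.foldl (fun (acc : List α × List α) x =>
        if P x then (acc.1, acc.2 ++ [x]) else (acc.1 ++ [x], acc.2)) (a, b)
    = (a ++ l.filter (fun x => !decide (P x)), b ++ l.filter (fun x => decide (P x))) := by
  induction l generalizing a b with
  | nil => simp
  | cons x l ih => by_cases hx : P x <;> simp [hx, ih]

theorem filter_append_filter_of_pairwise {α : Type} (M : Nat) (L : List (List α))
    (hp : L.Pairwise (fun x y => x.length ≤ y.length)) :
    L.filter (fun s => decide (s.length < M)) ++ L.filter (fun s => !decide (s.length < M)) = L := by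
  induction L with
  | nil => simp
  | cons x t ih =>
    have hx := (List.pairwise_cons.mp hp).1
    have ht := (List.pairwise_cons.mp hp).2
    by_cases h : x.length < M
    · simp only [List.filter_cons, h, decide_true, Bool.not_true, if_pos]
      simp [List.cons_append, ih ht]
    · have h1 : t.filter (fun s => decide (s.length < M)) = [] := by
        apply List.filter_eq_nil_iff.mpr
        intro y hy
        simp only [decide_eq_true_eq]
        have := hx y hy
        omega
      have h2 : t.filter (fun s => !decide (s.length < M)) = t := by
        apply List.filter_eq_self.mpr
        intro y hy
        simp only [Bool.not_eq_true']
        simp only [decide_eq_false_iff_not]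
        have := hx y hy
        omega
      simp [h, h1, h2]

theorem foldl_enumerate_filter {α : Type} (xs : List α) (np : List α) (g : Int → α → Bool)
    (p : α → Bool) (s : Int) (h : ∀ (k : Nat) (hk : k < xs.length), g (s + k) xs[k] = p xs[k]) :
    (PySem.List.enumerate xs s).foldl (fun acc q => if g q.1 q.2 then acc ++ [q.2] else acc) np
    = np ++ xs.filter p := by
  induction xs generalizing np s with
  | nil => simp [PySem.List.enumerate]
  | cons x t ih =>
    rw [PySem.List.enumerate_cons]
    simp only [List.foldl_cons]
    have h0 : g s x = p x := by simpa using h 0 (by simp)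
    have hrec := ih (if p x then np ++ [x] else np) (s + 1)
      (fun k hk => by simpa [add_assoc, add_comm, add_left_comm] using h (k + 1) (by simpa using hk))
    by_cases hx : p x
    · rw [show (if g (s, x).1 (s, x).2 then np ++ [(s, x).2] else np) = np ++ [x] by simp [h0, hx]]
      rw [show (if p x then np ++ [x] else np) = np ++ [x] from by simp [hx]] at hrec
      rw [hrec, List.filter_cons, if_pos (by simp [hx])]
      simp
    · rw [show (if g (s, x).1 (s, x).2 then np ++ [(s, x).2] else np) = np by simp [h0, hx]]
      rw [show (if p x then np ++ [x] else np) = np from by simp [hx]] at hrec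
      rw [hrec, List.filter_cons, if_neg (by simp [hx])]

theorem pairwise_le_getLast {α : Type} (L : List (List α)) (h : L ≠ [])
    (hp : L.Pairwise (fun x y => x.length ≤ y.length)) :
    ∀ x ∈ L, x.length ≤ (L.getLast h).length := by
  intro x hx
  rcases List.mem_iff_getElem.mp hx with ⟨i, hi, rfl⟩
  rw [List.getLast_eq_getElem]
  rcases Nat.lt_or_ge i (L.length - 1) with hlt | hge
  · exact List.pairwise_iff_getElem.mp hp i (L.length - 1) hi (by omega) hlt
  · have : i = L.length - 1 := by omega
    subst this; rfl

theorem rest_eq (C : List (List String)) :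
    List.foldl
      (fun acc q =>
        if
            (!(PySem.List.slice (PySem.List.sorted C fun x => x.length) (some (q.1 + 1))).any fun sequence2 =>
                  decide (q.2.length + 1 ≤ sequence2.length) &&
                    q.2 == PySem.List.slice sequence2 none (some ↑q.2.length)) =
              true then
          acc ++ [q.2]
        else acc)
      (List.foldl
          (fun acc sequence =>
            if sequence.length < ((PySem.List.pyGet? (PySem.List.sorted C fun x => x.length) (-1)).getD []).length then
              (acc.1, acc.2 ++ [sequence])
            else (acc.1 ++ [sequence], acc.2))
          ([], []) (PySem.List.sorted C fun x => x.length)).1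
      (PySem.List.enumerate
        (List.foldl
            (fun acc sequence =>
              if
                  sequence.length <
                    ((PySem.List.pyGet? (PySem.List.sorted C fun x => x.length) (-1)).getD []).length then
                (acc.1, acc.2 ++ [sequence])
              else (acc.1 ++ [sequence], acc.2))
            ([], []) (PySem.List.sorted C fun x => x.length)).2) =
    List.filter (fun c => c.length == (PySem.List.max? (List.map (fun c => c.length) C) fun x => x).getD 0)
        (PySem.List.sorted C fun x => x.length) ++
      List.filter
        (fun c =>
          decide (c.length < (PySem.List.max? (List.map (fun c => c.length) C) fun x => x).getD 0) &&
            !(PySem.Set.ofList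
                    (List.flatMap
                      (fun c =>
                        List.map (fun l => List.take l c)
                          (List.filter (fun l => decide (l < c.length))
                            (PySem.Set.ofList
                              (List.map (fun c => c.length)
                                (List.filter
                                  (fun c =>
                                    decide
                                      (c.length < (PySem.List.max? (List.map (fun c => c.length) C) fun x => x).getD 0))
                                  C)))))
                      C)).contains
                c)
        (PySem.List.sorted C fun x => x.length) := by
  by_cases hC : C = []
  · subst hC; rfl
  · set L := PySem.List.sorted C (fun x => x.length) false with hLdef
    have hLne : L ≠ [] := fun hnil => hC ((PySem.List.sorted_eq_nil_iff _ _ _).mp hnil)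
    have hperm : L.Perm C := PySem.List.sorted_perm _ _ _
    have hpw : L.Pairwise (fun a b => a.length ≤ b.length) := PySem.List.sorted_pairwise _ _
    have hlast : (PySem.List.pyGet? L (-1)).getD [] = L.getLast hLne := by
      simp [PySem.List.pyGet?_neg_one, List.getLast?_eq_some_getLast hLne]
    set M := (L.getLast hLne).length with hMdef
    have hub : ∀ x ∈ L, x.length ≤ M := pairwise_le_getLast L hLne hpw
    have hmax : (PySem.List.max? (C.map (fun c => c.length)) (fun x => x)).getD 0 = M := by
      cases hm : PySem.List.max? (C.map (fun c => c.length)) (fun x => x) with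
      | none =>
        exact absurd ((PySem.List.max?_eq_none_iff _ _).mp hm) (by simpa using hC)
      | some m =>
        have hmem := PySem.List.max?_mem hm
        have hisMax := PySem.List.max?_isMax hm
        rcases List.mem_map.mp hmem with ⟨c, hcC, rfl⟩
        have h1 : c.length ≤ M := hub c (hperm.mem_iff.mpr hcC)
        have h2 : M ≤ c.length := by
          apply hisMax
          exact List.mem_map.mpr ⟨L.getLast hLne, hperm.mem_iff.mp (List.getLast_mem hLne), rfl⟩
        simp
        omega
    rw [hlast, hmax, foldl_split]
    simp only [List.nil_append]
    rw [← hMdef]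
    have hsplit : L.filter (fun x => decide (x.length < M)) ++ L.filter (fun x => !decide (x.length < M)) = L :=
      filter_append_filter_of_pairwise M L hpw
    have hmemP : ∀ s : List String,
        ((PySem.Set.ofList
            (List.flatMap
              (fun c =>
                List.map (fun l => List.take l c)
                  (List.filter (fun l => decide (l < c.length))
                    (PySem.Set.ofList
                      (List.map (fun c => c.length)
                        (List.filter (fun c => decide (c.length < M)) C)))))
              C)).contains s = true)
        ↔ ∃ c ∈ C, ∃ l, l ∈ (PySem.Set.ofList
              (List.map (fun c => c.length)
                (List.filter (fun c => decide (c.length < M)) C)) : PySem.Set Nat)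
            ∧ l < c.length ∧ c.take l = s := by
      intro s
      rw [PySem.Set.contains_iff, PySem.Set.mem_ofList]
      simp only [List.mem_flatMap, List.mem_map, List.mem_filter, decide_eq_true_eq]
      tauto
    have hcond : ∀ (k : Nat) (hk : k < (L.filter (fun x => decide (x.length < M))).length),
        (fun (idx : Int) (seq : List String) =>
          !((PySem.List.slice L (some (idx + 1))).any fun sequence2 =>
              decide (seq.length + 1 ≤ sequence2.length) &&
                (seq == PySem.List.slice sequence2 none (some (seq.length : Int))))) ((0 : Int) + k)
          ((L.filter (fun x => decide (x.length < M)))[k])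
        = (fun c => !((PySem.Set.ofList
            (List.flatMap
              (fun c =>
                List.map (fun l => List.take l c)
                  (List.filter (fun l => decide (l < c.length))
                    (PySem.Set.ofList
                      (List.map (fun c => c.length)
                        (List.filter (fun c => decide (c.length < M)) C)))))
              C)).contains c))
            ((L.filter (fun x => decide (x.length < M)))[k]) := by
      intro k hk
      have hkL : k < L.length := by
        have hlen := congrArg List.length hsplit
        simp only [List.length_append] at hlen
        have := List.length_filter_le (fun x => decide (x.length < M)) L
        omega
      have hsk : L[k] = (L.filter (fun x => decide (x.length < M)))[k] := by
        have h1 := List.getElem_of_eq hsplit.symm hkL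
        rw [List.getElem_append_left hk] at h1
        exact h1
      have hkshort : L[k].length < M := by
        have hmem := List.getElem_mem hk
        have := (List.mem_filter.mp hmem).2
        rw [← hsk] at this
        simpa using this
      simp only [← hsk]
      have hcast : (0 : Int) + (k : Int) + 1 = ((k + 1 : Nat) : Int) := by push_cast; ring
      rw [hcast, PySem.List.slice_from_natCast]
      congr 1
      rw [Bool.eq_iff_iff, List.any_eq_true, hmemP]
      constructor
      · rintro ⟨t, ht, hf⟩
        simp only [Bool.and_eq_true, decide_eq_true_eq, beq_iff_eq] at hf
        obtain ⟨hlen1, htake⟩ := hf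
        rw [PySem.List.slice_to_natCast] at htake
        refine ⟨t, hperm.mem_iff.mp (List.mem_of_mem_drop ht), L[k].length, ?_, by omega, htake.symm⟩
        exact (PySem.Set.mem_ofList _ _).mpr
          (List.mem_map.mpr ⟨L[k],
            List.mem_filter.mpr ⟨hperm.mem_iff.mp (List.getElem_mem hkL), by simpa using hkshort⟩, rfl⟩)
      · rintro ⟨c, hcC, l, hlSL, hlc, htake⟩
        have hslen : L[k].length = l := by
          rw [← htake, List.length_take]
          omega
        have hcL : c ∈ L := hperm.mem_iff.mpr hcC
        rcases List.mem_iff_getElem.mp hcL with ⟨j, hj, rfl⟩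
        have hkj : k < j := by
          by_contra hle
          push Not at hle
          have hlen2 : L[j].length ≤ L[k].length := by
            rcases Nat.lt_or_eq_of_le hle with hlt | heq
            · exact List.pairwise_iff_getElem.mp hpw j k hj hkL hlt
            · subst heq; exact le_rfl
          omega
        refine ⟨L[j], ?_, ?_⟩
        · rw [List.mem_iff_getElem]
          refine ⟨j - (k + 1), by simp only [List.length_drop]; omega, ?_⟩
          rw [List.getElem_drop]
          congr 1
          omega
        · simp only [Bool.and_eq_true, decide_eq_true_eq, beq_iff_eq]
          refine ⟨by omega, ?_⟩
          rw [PySem.List.slice_to_natCast, hslen]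
          exact htake.symm
    rw [foldl_enumerate_filter (L.filter (fun x => decide (x.length < M)))
        (L.filter (fun x => !decide (x.length < M)))
        (fun (idx : Int) (seq : List String) =>
          !((PySem.List.slice L (some (idx + 1))).any fun sequence2 =>
              decide (seq.length + 1 ≤ sequence2.length) &&
                (seq == PySem.List.slice sequence2 none (some (seq.length : Int)))))
        (fun c => !((PySem.Set.ofList
            (List.flatMap
              (fun c =>
                List.map (fun l => List.take l c)
                  (List.filter (fun l => decide (l < c.length))
                    (PySem.Set.ofList
                      (List.map (fun c => c.length)
                        (List.filter (fun c => decide (c.length < M)) C)))))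
              C)).contains c))
        0 hcond]
    congr 1
    · apply List.filter_congr
      intro x hx
      have h1 := hub x hx
      rcases Nat.lt_or_ge x.length M with h2 | h2
      · simp only [h2, decide_true, Bool.not_true]
        symm
        simp only [beq_eq_false_iff_ne, ne_eq]
        omega
      · have h3 : x.length = M := by omega
        simp [h3]
    · rw [List.filter_filter]
      apply List.filter_congr
      intro x hx
      exact Bool.and_comm _ _

-- ===== VERDICT (by name: the statement is the Claim_ definition above) =====
theorem maintain_longest_sequences_spec : Claim_equal_maintain_longest_sequences := by
  intro ps _ hpre
  unfold Spec_maintain_longest_sequences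
  unfold maintain_longest_sequences maintain_longest_sequences_alt
  dsimp only
  rw [candidates_eq ps hpre]
  exact rest_eq _
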